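-- pv_equiv track=rewrite | github.com/eaysu/cse321-assignments | 1901042671_enes_aysu_hw5/question2.py | merge_sensors
-- ===== SOURCE A (Python) =====
-- def merge_sensors(left_sensors, right_sensors, exploration_areas):
--     merged_sensors = []
--     left_index, right_index = 0, 0
--
--     # merge the left and right sensor lists
--     while left_index < len(left_sensors) and right_index < len(right_sensors):
--         if left_sensors[left_index][0] < right_sensors[right_index][0]:
--             merged_sensors.append(left_sensors[left_index])
--             left_index += 1
--         else:
--             merged_sensors.append(right_sensors[right_index])
--             right_index += 1
--
--     # add remaining sensors, if any, from left and right lists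
--     merged_sensors.extend(left_sensors[left_index:])
--     merged_sensors.extend(right_sensors[right_index:])
--
--     # filter sensors to include only those within critical exploration areas
--     filtered_sensors = filter_sensors(merged_sensors, exploration_areas)
--
--     return filtered_sensors
--
-- def filter_sensors(sensors, exploration_areas):
--     filtered_sensors = []
--
--     # iterate through sensors and select the ones within critical exploration areas
--     for sensor in sensors:
--         if is_in_exploration_area(sensor, exploration_areas):
--             filtered_sensors.append(sensor)
--
--     return filtered_sensors
--
-- def is_in_exploration_area(sensor, exploration_areas):
--     # check if a sensor is within any critical exploration area
--     for area in exploration_areas: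
--         if area[0] <= sensor[0] <= area[2] and area[1] <= sensor[1] <= area[3]:
--             return True
--     return False
-- ===== SOURCE B (Python) =====
-- def merge_sensors(left_sensors, right_sensors, exploration_areas):
--     # single fused pass: filter during the merge via recursion, no intermediate merged list
--     def covered(s):
--         return any(a <= s[0] <= c and b <= s[1] <= d for (a, b, c, d) in exploration_areas)
--
--     def go(l, r):
--         if not l:
--             return [s for s in r if covered(s)]
--         if not r:
--             return [s for s in l if covered(s)]
--         if l[0][0] < r[0][0]:
--             rest = go(l[1:], r)
--             return [l[0]] + rest if covered(l[0]) else rest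
--         rest = go(l, r[1:])
--         return [r[0]] + rest if covered(r[0]) else rest
--
--     return go(left_sensors, right_sensors)
-- ===== Notes on version B (the rewrite author's own statement) =====
-- stated objective: alternative
-- what changed: Replaces A's two-phase index-based while-loop merge followed by a separate filtering pass with a single recursive merge that filters each sensor as it is emitted, never building the intermediate merged list.
import Mathlib
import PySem

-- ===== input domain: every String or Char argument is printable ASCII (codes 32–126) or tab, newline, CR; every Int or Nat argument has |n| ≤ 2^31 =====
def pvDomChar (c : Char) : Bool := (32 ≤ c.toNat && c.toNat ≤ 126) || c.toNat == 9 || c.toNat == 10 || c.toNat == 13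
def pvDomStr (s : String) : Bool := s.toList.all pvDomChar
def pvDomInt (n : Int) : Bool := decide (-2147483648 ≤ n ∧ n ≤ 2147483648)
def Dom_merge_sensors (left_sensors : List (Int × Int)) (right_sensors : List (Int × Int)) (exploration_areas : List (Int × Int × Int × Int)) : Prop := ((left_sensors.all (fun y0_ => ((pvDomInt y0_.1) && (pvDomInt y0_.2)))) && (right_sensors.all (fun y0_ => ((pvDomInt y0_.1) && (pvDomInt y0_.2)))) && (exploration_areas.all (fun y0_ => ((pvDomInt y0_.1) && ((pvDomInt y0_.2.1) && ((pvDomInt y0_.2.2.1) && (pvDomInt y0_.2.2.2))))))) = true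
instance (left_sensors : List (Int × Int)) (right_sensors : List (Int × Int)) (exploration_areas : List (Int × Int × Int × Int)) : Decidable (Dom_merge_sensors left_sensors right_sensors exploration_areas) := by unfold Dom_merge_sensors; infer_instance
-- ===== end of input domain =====

-- B fuses A's two phases (index-based merge loop, then a separate filter pass) into one
-- recursive merge that filters each sensor as it is emitted (objective: alternative).

-- ===== PORT A =====
-- is_in_exploration_area
def pvInArea (sensor : Int × Int) : List (Int × Int × Int × Int) → Bool
  | [] => false
  | area :: rest =>
    if area.1 ≤ sensor.1 ∧ sensor.1 ≤ area.2.2.1 ∧ area.2.1 ≤ sensor.2 ∧ sensor.2 ≤ area.2.2.2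
    then true else pvInArea sensor rest

-- filter_sensors ('for sensor in sensors: if …: filtered.append(sensor)')
def pvFilterSensors (sensors : List (Int × Int)) (areas : List (Int × Int × Int × Int)) : List (Int × Int) :=
  sensors.foldl (fun acc s => if pvInArea s areas then acc ++ [s] else acc) []

-- the while loop over left_index/right_index, then the two extends of the remaining slices
-- the loop runs at most len(l)+len(r) times; that fuel makes the recursion structural
def pvMergeLoop (l r : List (Int × Int)) : Nat → Nat → Nat → List (Int × Int) → List (Int × Int)
  | 0, li, ri, acc => acc ++ l.drop li ++ r.drop ri
  | fuel+1, li, ri, acc =>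
    if h : li < l.length ∧ ri < r.length then
      if (l[li]'h.1).1 < (r[ri]'h.2).1 then
        pvMergeLoop l r fuel (li+1) ri (acc ++ [l[li]'h.1])
      else
        pvMergeLoop l r fuel li (ri+1) (acc ++ [r[ri]'h.2])
    else acc ++ l.drop li ++ r.drop ri

def merge_sensors (left_sensors : List (Int × Int)) (right_sensors : List (Int × Int)) (exploration_areas : List (Int × Int × Int × Int)) : List (Int × Int) :=
  pvFilterSensors (pvMergeLoop left_sensors right_sensors (left_sensors.length + right_sensors.length) 0 0 []) exploration_areas

-- ===== PORT B =====
-- covered(s) = any(…)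
def pvCovered (areas : List (Int × Int × Int × Int)) (s : Int × Int) : Bool :=
  areas.any (fun q => decide (q.1 ≤ s.1 ∧ s.1 ≤ q.2.2.1 ∧ q.2.1 ≤ s.2 ∧ s.2 ≤ q.2.2.2))

-- go(l, r): recursive merge with the membership filter fused in
def pvGo (areas : List (Int × Int × Int × Int)) : List (Int × Int) → List (Int × Int) → List (Int × Int)
  | [], r => r.filter (pvCovered areas)
  | a :: l, [] => (a :: l).filter (pvCovered areas)
  | a :: l, b :: r =>
    if a.1 < b.1 then
      if pvCovered areas a then a :: pvGo areas l (b :: r) else pvGo areas l (b :: r)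
    else
      if pvCovered areas b then b :: pvGo areas (a :: l) r else pvGo areas (a :: l) r

def merge_sensors_alt (left_sensors : List (Int × Int)) (right_sensors : List (Int × Int)) (exploration_areas : List (Int × Int × Int × Int)) : List (Int × Int) :=
  pvGo exploration_areas left_sensors right_sensors

-- ===== PRECONDITION & SPEC =====
def Spec_merge_sensors (left_sensors : List (Int × Int)) (right_sensors : List (Int × Int)) (exploration_areas : List (Int × Int × Int × Int)) (out : List (Int × Int)) : Prop := out = merge_sensors_alt left_sensors right_sensors exploration_areas
instance (left_sensors : List (Int × Int)) (right_sensors : List (Int × Int)) (exploration_areas : List (Int × Int × Int × Int)) (out : List (Int × Int)) : Decidable (Spec_merge_sensors left_sensors right_sensors exploration_areas out) := by unfold Spec_merge_sensors; infer_instance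

-- ===== CLAIM (what is proved, stated in full; the proofs are below) =====
def Claim_equal_merge_sensors : Prop := ∀ (left_sensors : List (Int × Int)) (right_sensors : List (Int × Int)) (exploration_areas : List (Int × Int × Int × Int)), Dom_merge_sensors left_sensors right_sensors exploration_areas → Spec_merge_sensors left_sensors right_sensors exploration_areas (merge_sensors left_sensors right_sensors exploration_areas)

-- ===== LEMMAS AND PROOFS =====

-- plain structural merge, used only to relate the two ports
def pvM : List (Int × Int) → List (Int × Int) → List (Int × Int)
  | [], r => r
  | a :: l, [] => a :: l
  | a :: l, b :: r => if a.1 < b.1 then a :: pvM l (b :: r) else b :: pvM (a :: l) r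

theorem pvMergeLoop_tail (l r : List (Int × Int)) (li ri : Nat)
    (h1 : l.length ≤ li ∨ r.length ≤ ri) (acc : List (Int × Int)) :
    acc ++ l.drop li ++ r.drop ri = acc ++ pvM (l.drop li) (r.drop ri) := by
  rcases h1 with h1 | h1
  · rw [List.drop_eq_nil_of_le h1, pvM]
    simp
  · rw [List.drop_eq_nil_of_le h1, pvM.eq_def]
    cases l.drop li <;> simp

theorem pvMergeLoop_eq (l r : List (Int × Int)) (fuel li ri : Nat)
    (hf : (l.length - li) + (r.length - ri) ≤ fuel) (acc : List (Int × Int)) :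
    pvMergeLoop l r fuel li ri acc = acc ++ pvM (l.drop li) (r.drop ri) := by
  induction fuel generalizing li ri acc with
  | zero =>
    rw [pvMergeLoop]
    exact pvMergeLoop_tail l r li ri (by omega) acc
  | succ fuel ih =>
    rw [pvMergeLoop]
    split
    · rename_i h
      rw [List.drop_eq_getElem_cons h.1, List.drop_eq_getElem_cons h.2, pvM]
      split
      · rw [ih (li+1) ri (by omega), List.drop_eq_getElem_cons h.2]
        simp
      · rw [ih li (ri+1) (by omega), List.drop_eq_getElem_cons h.1]
        simp
    · rename_i h
      exact pvMergeLoop_tail l r li ri (by omega) acc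

theorem pvInArea_eq_covered (s : Int × Int) (areas : List (Int × Int × Int × Int)) :
    pvInArea s areas = pvCovered areas s := by
  induction areas with
  | nil => simp [pvInArea, pvCovered]
  | cons q rest ih =>
    rw [pvInArea, pvCovered, List.any_cons]
    split_ifs with h
    · simp [h]
    · rw [ih, pvCovered]
      simp [h]

theorem pvGo_eq_filter (areas : List (Int × Int × Int × Int)) (l r : List (Int × Int)) :
    pvGo areas l r = (pvM l r).filter (pvCovered areas) := by
  fun_induction pvGo areas l r
  case case1 => rw [pvM]
  case case2 => rw [pvM]
  case case3 hlt hc ih => rw [pvM, if_pos hlt, List.filter_cons, hc]; simp [ih]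
  case case4 hlt hc ih => rw [pvM, if_pos hlt, List.filter_cons]; simp [hc, ih]
  case case5 hlt hc ih => rw [pvM, if_neg hlt, List.filter_cons, hc]; simp [ih]
  case case6 hlt hc ih => rw [pvM, if_neg hlt, List.filter_cons]; simp [hc, ih]

-- ===== VERDICT (by name: the statement is the Claim_ definition above) =====
theorem merge_sensors_spec : Claim_equal_merge_sensors := by
  intro l r areas _
  unfold Spec_merge_sensors merge_sensors merge_sensors_alt pvFilterSensors
  rw [pvMergeLoop_eq l r _ 0 0 (by omega), pvGo_eq_filter]
  simp only [List.drop_zero, List.nil_append]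
  rw [PySem.List.foldl_append_if_eq_filter, List.nil_append]
  exact List.filter_congr (fun x _ => pvInArea_eq_covered x areas)
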